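-- pv_equiv track=rewrite | github.com/Martin-dev7201/NSI_1er_2025 | Language Python/Correction clavier.py | correcteur
-- ===== SOURCE A (Python) =====
-- def correcteur(clavier_voulu, clavier_reel, texte_affiche):
--     resultat = ""
--     for caractere in texte_affiche:
--         lettre_trouvee = False
--         for i in range(len(clavier_reel)):
--             if caractere == clavier_reel[i]:
--                 resultat += clavier_voulu[i]
--                 lettre_trouvee = True
--
--         if not lettre_trouvee:
--             resultat += caractere
--
--     return resultat
-- ===== SOURCE B (Python) =====
-- def correcteur(clavier_voulu, clavier_reel, texte_affiche):
--     positions = {}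
--     for i, c in enumerate(clavier_reel):
--         positions.setdefault(c, []).append(i)
--     morceaux = []
--     for caractere in texte_affiche:
--         indices = positions.get(caractere)
--         if indices is None:
--             morceaux.append(caractere)
--         else:
--             for i in indices:
--                 morceaux.append(clavier_voulu[i])
--     return "".join(morceaux)
-- ===== Notes on version B (the rewrite author's own statement) =====
-- stated objective: alternative
-- what changed: B builds a position index of clavier_reel once (char -> list of indices) and then makes a single dictionary-lookup pass over texte_affiche, instead of A's rescanning all of clavier_reel for every character of the text.
import Mathlib
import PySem

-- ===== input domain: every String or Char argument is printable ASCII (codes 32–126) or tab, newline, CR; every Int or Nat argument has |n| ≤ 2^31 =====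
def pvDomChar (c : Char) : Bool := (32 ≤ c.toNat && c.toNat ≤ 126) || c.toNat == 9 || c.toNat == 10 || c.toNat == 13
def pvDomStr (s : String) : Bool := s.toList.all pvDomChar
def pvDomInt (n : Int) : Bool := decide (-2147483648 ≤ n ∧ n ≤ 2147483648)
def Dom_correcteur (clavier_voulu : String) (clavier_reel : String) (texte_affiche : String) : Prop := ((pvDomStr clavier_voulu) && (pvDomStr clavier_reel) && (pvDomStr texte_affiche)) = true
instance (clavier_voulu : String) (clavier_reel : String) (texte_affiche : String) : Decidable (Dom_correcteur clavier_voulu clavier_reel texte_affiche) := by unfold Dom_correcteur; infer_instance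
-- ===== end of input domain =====

-- B builds a position index of clavier_reel once and makes a single indexed pass over texte_affiche,
-- instead of A's rescan of all of clavier_reel for every character of the text.

-- ===== PORT A =====
def correcteur (clavier_voulu : String) (clavier_reel : String) (texte_affiche : String) : String :=
  String.ofList (texte_affiche.toList.foldl
    (fun (resultat : List Char) caractere =>
      -- inner loop: for i in range(len(clavier_reel)), state (resultat, lettre_trouvee)
      let st := (PySem.List.pyRange 0 (clavier_reel.toList.length : Int) 1).foldl
        (fun (st : List Char × Bool) i =>
          if caractere = PySem.List.pyGetD clavier_reel.toList i ' '
          then (st.1 ++ [PySem.List.pyGetD clavier_voulu.toList i ' '], true)  -- clavier_voulu[i]: in range under Pre_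
          else st)
        (resultat, false)
      if st.2 then st.1 else st.1 ++ [caractere])
    [])

-- ===== PORT B =====
def correcteur_alt (clavier_voulu : String) (clavier_reel : String) (texte_affiche : String) : String :=
  -- positions: char -> list of its indices in clavier_reel, built once over enumerate(clavier_reel)
  let positions : PySem.Dict Char (List Int) :=
    (PySem.List.enumerate clavier_reel.toList).foldl
      (fun d p => d.modify p.2 [] (· ++ [p.1]))  -- positions.setdefault(c, []).append(i)
      PySem.Dict.empty
  String.ofList (texte_affiche.toList.foldl
    (fun (morceaux : List Char) caractere =>
      match positions.get? caractere with
      | none => morceaux ++ [caractere]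
      | some indices => morceaux ++ indices.map (fun i => PySem.List.pyGetD clavier_voulu.toList i ' '))
    [])

-- ===== PRECONDITION & SPEC =====
-- Pre_ excludes exactly the inputs where A raises IndexError: some character of texte_affiche
-- occurs in clavier_reel at an index that is out of range for clavier_voulu (B raises there too).
def Pre_correcteur (clavier_voulu : String) (clavier_reel : String) (texte_affiche : String) : Prop :=
  ∀ i < clavier_reel.toList.length,
    clavier_reel.toList.getD i ' ' ∈ texte_affiche.toList → i < clavier_voulu.toList.length
instance (clavier_voulu : String) (clavier_reel : String) (texte_affiche : String) : Decidable (Pre_correcteur clavier_voulu clavier_reel texte_affiche) := by unfold Pre_correcteur; infer_instance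

def pvWitness_correcteur : String × String × String := ("abc", "qsd", "qsq x")

def Spec_correcteur (clavier_voulu : String) (clavier_reel : String) (texte_affiche : String) (out : String) : Prop := out = correcteur_alt clavier_voulu clavier_reel texte_affiche
instance (clavier_voulu : String) (clavier_reel : String) (texte_affiche : String) (out : String) : Decidable (Spec_correcteur clavier_voulu clavier_reel texte_affiche out) := by unfold Spec_correcteur; infer_instance

-- ===== CLAIM (what is proved, stated in full; the proofs are below) =====
def Claim_equal_correcteur : Prop := ∀ (clavier_voulu : String) (clavier_reel : String) (texte_affiche : String), Dom_correcteur clavier_voulu clavier_reel texte_affiche → Pre_correcteur clavier_voulu clavier_reel texte_affiche → Spec_correcteur clavier_voulu clavier_reel texte_affiche (correcteur clavier_voulu clavier_reel texte_affiche)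

-- ===== LEMMAS AND PROOFS =====

-- the indices k < n with r[k] = c, in order — the common characterisation of both programs
def pvIdx (r : List Char) (c : Char) (n : Nat) : List Nat :=
  (List.range n).filter (fun k => c = r.getD k ' ')

-- A's inner loop over range(len(clavier_reel)) appends v[k] for each matching index and
-- sets lettre_trouvee iff there was a match
theorem pvA_inner (r v : List Char) (c : Char) (n : Nat) (res : List Char) (b : Bool) :
    (PySem.List.pyRange 0 (n : Int) 1).foldl
      (fun (st : List Char × Bool) i =>
        if c = PySem.List.pyGetD r i ' '
        then (st.1 ++ [PySem.List.pyGetD v i ' '], true)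
        else st)
      (res, b)
    = (res ++ (pvIdx r c n).map (fun k => v.getD k ' '),
       b || !(pvIdx r c n).isEmpty) := by
  induction n generalizing res b with
  | zero => simp [pvIdx, PySem.List.pyRange_one_eq_nil]
  | succ m ih =>
    rw [show ((m+1 : Nat) : Int) = (m : Int) + 1 by push_cast; ring,
        PySem.List.pyRange_one_succ_right (by positivity), List.foldl_append, ih]
    simp only [pvIdx, List.range_succ, List.filter_append, List.map_append, List.foldl_cons,
      List.foldl_nil, PySem.List.pyGetD_natCast, List.filter_singleton]
    simp only [List.getD] at *
    by_cases h : c = r[m]?.getD ' '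
    · simp [h]
    · simp [h]

theorem pvIdx_cons (c x : Char) (xs : List Char) :
    pvIdx (x :: xs) c (xs.length + 1)
    = (if c = x then [0] else []) ++ (pvIdx xs c xs.length).map (· + 1) := by
  simp only [pvIdx, List.range_succ_eq_map, List.filter_cons, List.getD_cons_zero,
    List.filter_map, Function.comp_def, List.getD_cons_succ]
  by_cases h : c = x <;> simp [h]

-- matching indices of enumerate(r, s), as Ints shifted by the start s
theorem pvEnumIdx (c : Char) (r : List Char) (s : Int) :
    ((PySem.List.enumerate r s).filter (fun p => p.2 == c)).map (·.1)
    = (pvIdx r c r.length).map (fun (k : Nat) => s + (k : Int)) := by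
  induction r generalizing s with
  | nil => simp [pvIdx, PySem.List.enumerate]
  | cons x xs ih =>
    rw [PySem.List.enumerate_cons, List.filter_cons, List.length_cons, pvIdx_cons,
      List.map_append, List.map_map]
    by_cases h : x = c
    · simp only [h, beq_self_eq_true, if_pos, List.map_cons, ih]
      simp only [Function.comp_def]
      refine congrArg₂ _ (by simp) (List.map_congr_left fun a _ => by push_cast; ring)
    · rw [if_neg (by simpa using h), if_neg (fun hc => h hc.symm), ih]
      simp only [Function.comp_def]
      exact List.map_congr_left fun a _ => by push_cast; ring

-- B's index dictionary (the foldl in correcteur_alt, named for the proofs)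
def pvPositions (r : List Char) : PySem.Dict Char (List Int) :=
  (PySem.List.enumerate r).foldl (fun d p => d.modify p.2 [] (· ++ [p.1])) PySem.Dict.empty

theorem pvPositions_getD (r : List Char) (c : Char) :
    (pvPositions r).getD c []
    = (pvIdx r c r.length).map (fun (k : Nat) => (k : Int)) := by
  have hfold : pvPositions r
      = ((PySem.List.enumerate r).map (fun p => (p.2, p.1))).foldl
          (fun d q => d.modify q.1 [] (· ++ [q.2])) PySem.Dict.empty := by
    rw [List.foldl_map]; rfl
  rw [hfold, PySem.Dict.getD_foldl_modify_append, PySem.Dict.getD_empty, List.nil_append,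
    List.filter_map, List.map_map]
  have := pvEnumIdx c r 0
  simp only [Function.comp_def] at this ⊢
  rw [this]
  exact List.map_congr_left fun a _ => by ring

theorem pvPositions_mem_keys (r : List Char) (c : Char) :
    c ∈ (pvPositions r).keys ↔ c ∈ r := by
  rw [pvPositions, PySem.Dict.keys_foldl_modify_key (PySem.List.enumerate r) (fun p => p.2) []
      (fun _ p => fun xs => xs ++ [p.1]) PySem.Dict.empty, PySem.List.map_snd_enumerate]
  simp [PySem.Set.mem_update, PySem.Dict.keys_empty]

theorem pvIdx_eq_nil_iff (r : List Char) (c : Char) :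
    pvIdx r c r.length = [] ↔ c ∉ r := by
  simp only [pvIdx, List.filter_eq_nil_iff, decide_eq_true_eq]
  constructor
  · intro h hc
    obtain ⟨k, hk, hke⟩ := List.mem_iff_getElem.mp hc
    exact h k (List.mem_range.mpr hk) (by rw [List.getD_eq_getElem _ _ hk, hke])
  · intro hc k hk he
    rw [List.mem_range] at hk
    exact hc (he ▸ (List.getD_eq_getElem _ _ hk ▸ List.getElem_mem hk))

theorem pv_main (v r t : String) : correcteur v r t = correcteur_alt v r t := by
  unfold correcteur correcteur_alt
  apply congrArg String.ofList
  apply List.foldl_ext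
  intro res c _
  rw [pvA_inner r.toList v.toList c r.toList.length res false]
  have hpos : (PySem.List.enumerate r.toList).foldl
      (fun d p => d.modify p.2 [] (· ++ [p.1])) PySem.Dict.empty = pvPositions r.toList := rfl
  rw [hpos]
  cases hg : (pvPositions r.toList).get? c with
  | none =>
    have hk : c ∉ (pvPositions r.toList).keys :=
      (PySem.Dict.get?_eq_none_iff_not_mem_keys _ _).mp hg
    have hcr : c ∉ r.toList := fun h => hk ((pvPositions_mem_keys _ _).mpr h)
    have hnil : pvIdx r.toList c r.toList.length = [] := (pvIdx_eq_nil_iff _ _).mpr hcr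
    simp only [String.length_toList] at hnil
    simp [hnil]
  | some is =>
    have hk : c ∈ (pvPositions r.toList).keys := by
      by_contra hk
      rw [(PySem.Dict.get?_eq_none_iff_not_mem_keys _ _).mpr hk] at hg
      simp at hg
    have hcr : c ∈ r.toList := (pvPositions_mem_keys _ _).mp hk
    have hne : pvIdx r.toList c r.toList.length ≠ [] :=
      fun h => (pvIdx_eq_nil_iff _ _).mp h hcr
    have his : is = (pvIdx r.toList c r.toList.length).map (fun (k : Nat) => (k : Int)) := by
      have := pvPositions_getD r.toList c
      rw [PySem.Dict.getD_eq_get?_getD, hg] at this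
      simpa using this
    simp only [his, List.map_map, Function.comp_def, PySem.List.pyGetD_natCast]
    simp only [String.length_toList] at hne
    simp [List.isEmpty_eq_false_iff, hne]

-- ===== VERDICT (by name: the statement is the Claim_ definition above) =====
theorem correcteur_spec : Claim_equal_correcteur := by
  intro v r t _ _
  unfold Spec_correcteur
  exact pv_main v r t
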